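-- pv_equiv track=rewrite | github.com/vdorr/bloced | hparser.py | extract_declarations
-- ===== SOURCE A (Python) =====
-- T_COMMENT = 2
--
-- T_SEMICOLON = 4
--
-- T_LEFT_BRACKET = 5
--
-- T_RIGHT_BRACKET = 6
--
-- T_COMMA = 7
--
-- T_OTHER = 9
--
-- def is_declaration(l) :
-- 	allowed = (T_COMMENT, T_OTHER)
-- 	for tok_type, _ in l :
--
-- 		if tok_type == T_LEFT_BRACKET :
-- 			allowed = (T_COMMENT, T_OTHER, T_COMMA)
-- 			continue
-- 		elif tok_type == T_RIGHT_BRACKET :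
-- 			allowed = (T_SEMICOLON, )
-- 			continue
--
-- 		if not tok_type in allowed :
-- 			return False
-- 	return True
--
-- __DECL_TOK_TYPES = set((T_COMMENT, T_OTHER, T_COMMA, T_LEFT_BRACKET, T_RIGHT_BRACKET))
--
-- def extract_declarations(l) :
-- 	hit = []
-- 	for tok_type, tok in l :
-- 		hit.append((tok_type, tok))
-- 		if tok_type == T_SEMICOLON :
-- 			if is_declaration(hit) :
-- 				yield hit
-- 			hit = []
-- 		elif not tok_type in __DECL_TOK_TYPES :
-- 			hit = []
-- ===== SOURCE B (Python) =====
-- T_COMMENT = 2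
-- T_SEMICOLON = 4
-- T_LEFT_BRACKET = 5
-- T_RIGHT_BRACKET = 6
-- T_COMMA = 7
-- T_OTHER = 9
--
-- def extract_declarations(l):
-- 	# single-pass state machine: st 0 = base, 1 = after '(', 2 = after ')'
-- 	hit, st, valid = [], 0, True
-- 	for tok_type, tok in l:
-- 		hit.append((tok_type, tok))
-- 		if tok_type == T_SEMICOLON:
-- 			if valid and st == 2:
-- 				yield hit
-- 			hit, st, valid = [], 0, True
-- 		elif tok_type == T_LEFT_BRACKET:
-- 			st = 1
-- 		elif tok_type == T_RIGHT_BRACKET: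
-- 			st = 2
-- 		elif tok_type == T_COMMENT or tok_type == T_OTHER:
-- 			if st == 2:
-- 				valid = False
-- 		elif tok_type == T_COMMA:
-- 			if st != 1:
-- 				valid = False
-- 		else:
-- 			hit, st, valid = [], 0, True
-- ===== Notes on version B (the rewrite author's own statement) =====
-- stated objective: alternative
-- what changed: A accumulates tokens and re-scans the whole hit with is_declaration at every semicolon; B drops the helper and tracks the validation state (bracket state + valid flag) incrementally in one pass.
import Mathlib
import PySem

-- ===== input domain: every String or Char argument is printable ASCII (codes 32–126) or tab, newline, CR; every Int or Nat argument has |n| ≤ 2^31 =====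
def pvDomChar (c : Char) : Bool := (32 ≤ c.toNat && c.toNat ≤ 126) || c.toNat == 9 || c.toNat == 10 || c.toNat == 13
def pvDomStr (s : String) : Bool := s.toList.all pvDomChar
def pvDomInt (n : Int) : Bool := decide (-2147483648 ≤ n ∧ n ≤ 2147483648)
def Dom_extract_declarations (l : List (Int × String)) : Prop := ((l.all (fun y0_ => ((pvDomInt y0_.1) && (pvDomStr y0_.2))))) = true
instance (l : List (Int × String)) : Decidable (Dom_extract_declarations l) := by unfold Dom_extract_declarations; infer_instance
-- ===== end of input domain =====

-- B replaces A's accumulate-then-rescan (is_declaration re-walks the whole hit at every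
-- semicolon) with a single-pass incremental state machine; objective: alternative decomposition.

-- ===== PORT A =====
-- is_declaration: loop over l with the mutable tuple `allowed`
def isDeclGo : List (Int × String) → List Int → Bool
  | [], _ => true
  | (t, _) :: rest, allowed =>
    if t == 5 then isDeclGo rest [2, 9, 7]
    else if t == 6 then isDeclGo rest [4]
    else if allowed.contains t then isDeclGo rest allowed
    else false

def is_declaration (l : List (Int × String)) : Bool := isDeclGo l [2, 9]

-- one iteration of A's for-loop: state = (yielded so far, hit)
def stepA (acc : List (List (Int × String)) × List (Int × String)) (tok : Int × String) :
    List (List (Int × String)) × List (Int × String) :=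
  let hit := acc.2 ++ [tok]
  if tok.1 == 4 then
    ((if is_declaration hit then acc.1 ++ [hit] else acc.1), [])
  else if [2, 9, 7, 5, 6].contains tok.1 then (acc.1, hit)
  else (acc.1, [])

def extract_declarations (l : List (Int × String)) : List (List (Int × String)) :=
  (l.foldl stepA ([], [])).1

-- ===== PORT B =====
-- one iteration of B's loop: state = (yielded so far, hit, st, valid); st 0 = base, 1 = after '(', 2 = after ')'
def stepB (acc : List (List (Int × String)) × List (Int × String) × Int × Bool) (tok : Int × String) :
    List (List (Int × String)) × List (Int × String) × Int × Bool :=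
  let (out, hit, st, valid) := acc
  let hit := hit ++ [tok]
  if tok.1 == 4 then
    ((if valid && st == 2 then out ++ [hit] else out), [], 0, true)
  else if tok.1 == 5 then (out, hit, 1, valid)
  else if tok.1 == 6 then (out, hit, 2, valid)
  else if tok.1 == 2 || tok.1 == 9 then (out, hit, st, if st == 2 then false else valid)
  else if tok.1 == 7 then (out, hit, st, if st != 1 then false else valid)
  else (out, [], 0, true)

def extract_declarations_alt (l : List (Int × String)) : List (List (Int × String)) :=
  (l.foldl stepB ([], [], 0, true)).1

-- ===== PRECONDITION & SPEC =====
def Spec_extract_declarations (l : List (Int × String)) (out : List (List (Int × String))) : Prop := out = extract_declarations_alt l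
instance (l : List (Int × String)) (out : List (List (Int × String))) : Decidable (Spec_extract_declarations l out) := by unfold Spec_extract_declarations; infer_instance

-- ===== CLAIM (what is proved, stated in full; the proofs are below) =====
def Claim_equal_extract_declarations : Prop := ∀ (l : List (Int × String)), Dom_extract_declarations l → Spec_extract_declarations l (extract_declarations l)

-- ===== LEMMAS AND PROOFS =====

/-- the `allowed` tuple that B's state code `st` stands for -/
def allowedOf (st : Int) : List Int :=
  if st == 1 then [2, 9, 7] else if st == 2 then [4] else [2, 9]

lemma base_inv : ∀ k : List (Int × String),
    isDeclGo ([] ++ k) [2, 9] = (if true then isDeclGo k (allowedOf 0) else false) := by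
  intro k; simp [allowedOf]

lemma loop_eq : ∀ (l : List (Int × String)) (out : List (List (Int × String)))
    (hit : List (Int × String)) (st : Int) (valid : Bool),
    (st = 0 ∨ st = 1 ∨ st = 2) →
    (∀ k, isDeclGo (hit ++ k) [2, 9] = (if valid then isDeclGo k (allowedOf st) else false)) →
    (l.foldl stepA (out, hit)).1 = (l.foldl stepB (out, hit, st, valid)).1 := by
  intro l
  induction l with
  | nil => intro out hit st valid _ _; rfl
  | cons tok rest ih =>
    intro out hit st valid hst hinv
    obtain ⟨t, s⟩ := tok
    simp only [List.foldl_cons]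
    by_cases h4 : t = 4
    · -- semicolon: A re-scans the whole hit, B consults (valid, st)
      subst h4
      have hdecl : is_declaration (hit ++ [(4, s)]) = (valid && (st == 2)) := by
        have := hinv [(4, s)]
        simp only [is_declaration, this]
        rcases hst with h | h | h <;> subst h <;> cases valid <;>
          simp [isDeclGo, allowedOf]
      have e1 : stepA (out, hit) (4, s)
          = ((if is_declaration (hit ++ [(4, s)]) then out ++ [hit ++ [(4, s)]] else out), []) := rfl
      have e2 : stepB (out, hit, st, valid) (4, s)
          = ((if valid && st == 2 then out ++ [hit ++ [(4, s)]] else out), [], 0, true) := rfl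
      rw [e1, e2, hdecl]
      exact ih _ _ 0 true (Or.inl rfl) base_inv
    · by_cases h5 : t = 5
      · subst h5
        have e1 : stepA (out, hit) (5, s) = (out, hit ++ [(5, s)]) := rfl
        have e2 : stepB (out, hit, st, valid) (5, s) = (out, hit ++ [(5, s)], 1, valid) := rfl
        rw [e1, e2]
        refine ih _ _ 1 valid (Or.inr (Or.inl rfl)) (fun k => ?_)
        have := hinv ((5, s) :: k)
        simpa [isDeclGo, allowedOf] using this
      · by_cases h6 : t = 6
        · subst h6
          have e1 : stepA (out, hit) (6, s) = (out, hit ++ [(6, s)]) := rfl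
          have e2 : stepB (out, hit, st, valid) (6, s) = (out, hit ++ [(6, s)], 2, valid) := rfl
          rw [e1, e2]
          refine ih _ _ 2 valid (Or.inr (Or.inr rfl)) (fun k => ?_)
          have := hinv ((6, s) :: k)
          simpa [isDeclGo, allowedOf] using this
        · by_cases h2 : t = 2
          · subst h2
            have e1 : stepA (out, hit) (2, s) = (out, hit ++ [(2, s)]) := rfl
            have e2 : stepB (out, hit, st, valid) (2, s)
                = (out, hit ++ [(2, s)], st, if st == 2 then false else valid) := rfl
            rw [e1, e2]
            refine ih _ _ st _ hst (fun k => ?_)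
            have := hinv ((2, s) :: k)
            rcases hst with h | h | h <;> subst h <;> cases valid <;>
              simpa [isDeclGo, allowedOf] using this
          · by_cases h9 : t = 9
            · subst h9
              have e1 : stepA (out, hit) (9, s) = (out, hit ++ [(9, s)]) := rfl
              have e2 : stepB (out, hit, st, valid) (9, s)
                  = (out, hit ++ [(9, s)], st, if st == 2 then false else valid) := rfl
              rw [e1, e2]
              refine ih _ _ st _ hst (fun k => ?_)
              have := hinv ((9, s) :: k)
              rcases hst with h | h | h <;> subst h <;> cases valid <;>
                simpa [isDeclGo, allowedOf] using this
            · by_cases h7 : t = 7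
              · subst h7
                have e1 : stepA (out, hit) (7, s) = (out, hit ++ [(7, s)]) := rfl
                have e2 : stepB (out, hit, st, valid) (7, s)
                    = (out, hit ++ [(7, s)], st, if st != 1 then false else valid) := rfl
                rw [e1, e2]
                refine ih _ _ st _ hst (fun k => ?_)
                have := hinv ((7, s) :: k)
                rcases hst with h | h | h <;> subst h <;> cases valid <;>
                  simpa [isDeclGo, allowedOf] using this
              · -- foreign token: both sides reset
                have h4' : (t == 4) = false := by simp [h4]
                have h5' : (t == 5) = false := by simp [h5]
                have h6' : (t == 6) = false := by simp [h6]
                have h2' : (t == 2) = false := by simp [h2]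
                have h9' : (t == 9) = false := by simp [h9]
                have h7' : (t == 7) = false := by simp [h7]
                have hmem : ([2, 9, 7, 5, 6] : List Int).contains t = false := by
                  simp only [List.contains_eq_mem, List.mem_cons, List.not_mem_nil,
                    or_false, decide_eq_false_iff_not]
                  exact fun h => by rcases h with h|h|h|h|h <;> [exact h2 h; exact h9 h; exact h7 h; exact h5 h; exact h6 h]
                have e1 : stepA (out, hit) (t, s) = (out, []) := by
                  simp only [stepA]; rw [h4', hmem]; simp
                have e2 : stepB (out, hit, st, valid) (t, s) = (out, [], 0, true) := by
                  simp [stepB, h4', h5', h6', h2', h9', h7']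
                rw [e1, e2]
                exact ih _ _ 0 true (Or.inl rfl) base_inv

-- ===== VERDICT (by name: the statement is the Claim_ definition above) =====
theorem extract_declarations_spec : Claim_equal_extract_declarations := by
  intro l _
  unfold Spec_extract_declarations extract_declarations extract_declarations_alt
  exact loop_eq l [] [] 0 true (Or.inl rfl) base_inv
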